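-- pv_equiv track=rewrite | github.com/Melodiz/dailycode | Algorithms/some_intern_contests/tinkoff_winter/task_4/brute_force.py | brute_solution
-- ===== SOURCE A (Python) =====
-- import math
-- from itertools import combinations, product
--
-- def cost_to_divisible(a, d):
--     """
--     Returns how many increments are needed to make 'a' divisible by 'd'.
--     That is:  cost = (d - (a mod d)) mod d.
--     """
--     r = a % d
--     if r == 0:
--         return 0
--     return d - r
--
-- def brute_solution(n, x, y, z, arr):
--     """
--     Brute-force approach:
--       1) Precompute cost_to_cover_mask(a, mask) for each a in arr and mask in {1..7}.
--       2) Try every subset of arr of size 1..3.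
--       3) For each subset, try all ways to distribute the three conditions (x, y, z)
--          (represented by bitmask 1..4..2 = 1,2,4) across the chosen elements
--          so that the union of condition-subsets is {1,2,4} (bitmask=7).
--       4) Minimize the total cost.
--     """
--     # Map each bitmask 1..7 to the corresponding LCM of the needed divisors among x, y, z
--     #    bit 0 (value 1) => x
--     #    bit 1 (value 2) => y
--     #    bit 2 (value 4) => z
--     # mask = 1 => lcm(x)
--     # mask = 2 => lcm(y)
--     # mask = 3 => lcm(x,y)
--     # mask = 4 => lcm(z)
--     # mask = 5 => lcm(x,z)
--     # mask = 6 => lcm(y,z)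
--     # mask = 7 => lcm(x,y,z)
--     divisors = [(1, x), (2, y), (4, z)]  # (bit, value)
--
--     # Precompute the LCM for each mask from 1..7
--     lcm_for_mask = [0]*8
--     for mask in range(1, 8):
--         # collect divisors belonging to this mask
--         ds = []
--         for bit, val in divisors:
--             if mask & bit:
--                 ds.append(val)
--         # compute LCM of those
--         l = 1
--         for d in ds:
--             l = (l*d)//math.gcd(l, d)
--         lcm_for_mask[mask] = l
--
--     # Precompute cost[a_index][mask] = cost to make arr[a_index] cover the subset of conditions in mask
--     # That is cost to make arr[a_index] divisible by lcm_for_mask[mask].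
--     cost_array = []
--     for a in arr:
--         row = [0]*8
--         for mask in range(1, 8):
--             row[mask] = cost_to_divisible(a, lcm_for_mask[mask])
--         cost_array.append(row)
--
--     # If it's possible that one element covers everything, we look up cost of bitmask=7
--     # Now we brute force over subsets of the array of size 1..3
--     best = float('inf')
--     # We only need up to 3 elements because there are 3 conditions in total
--     for subset_size in (1, 2, 3):
--         for indices in combinations(range(n), subset_size):
--             # Try to assign each of the 3 conditions (bits 1,2,4 => 7 total) among these subset_size elements
--             # We'll do a small "mask assignment": each chosen element gets a mask in [0..7].
--             # Then the union of those masks must be 7 (meaning x, y, z are all covered).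
--
--             # Because subset_size <= 3, we can simply try all possible masks for each element:
--             # That's 7^subset_size ways in the worst case (excluding mask=0 because that covers no condition).
--             # But we can allow mask=0 if we want, as it won't help but might skip a condition. We'll skip 0 so we
--             # don't have an element that covers nothing (it wouldn't reduce cost).
--
--             # We'll gather the minimal sum of costs among the ways that achieve union=7.
--
--             local_best = float('inf')
--             all_masks = range(1, 8)  # from 1..7
--             # For the chosen subset_size elements, do a cartesian product of possible masks
--             for chosen_masks in product(all_masks, repeat=subset_size):
--                 union_mask = 0
--                 for m in chosen_masks:
--                     union_mask |= m
--                 if union_mask == 7: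
--                     # covers x,y,z
--                     total_cost = 0
--                     for idx_el, ms in zip(indices, chosen_masks):
--                         total_cost += cost_array[idx_el][ms]
--                     if total_cost < local_best:
--                         local_best = total_cost
--
--             best = min(best, local_best)
--
--     return best
-- ===== SOURCE B (Python) =====
-- import math
--
-- def brute_solution(n, x, y, z, arr):
--     """
--     One-pass DP: process the first n elements once; dp[m][k] = minimum total cost
--     to cover exactly the condition-bitmask m (bit1=x, bit2=y, bit4=z) using k
--     distinct elements seen so far, each element assigned one nonempty mask.
--     Answer = min(dp[7][1], dp[7][2], dp[7][3]).  O(n) instead of A's O(n^3).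
--     """
--     INF = float('inf')
--
--     def lcm_mask(mask):
--         l = 1
--         for bit, v in ((1, x), (2, y), (4, z)):
--             if mask & bit:
--                 l = (l * v) // math.gcd(l, v)
--         return l
--
--     lcms = [lcm_mask(m) for m in range(8)]
--
--     def cost(a, m):
--         r = a % lcms[m]
--         return 0 if r == 0 else lcms[m] - r
--
--     dp = [[0 if (M, k) == (0, 0) else INF for k in range(4)] for M in range(8)]
--     for i in range(n):
--         a = arr[i]
--         dp = [[min([dp[M][k]] +
--                    [dp[m][k - 1] + cost(a, mm)
--                     for m in range(8) for mm in range(1, 8)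
--                     if k >= 1 and (m | mm) == M])
--                for k in range(4)]
--               for M in range(8)]
--     return min(dp[7][1], dp[7][2], dp[7][3])
-- ===== Notes on version B (the rewrite author's own statement) =====
-- stated objective: faster
-- what changed: Replaces A's enumeration of all size-1..3 index subsets times all 7^k mask assignments (O(n^3) subsets) by a single left-to-right DP over the first n elements whose state dp[mask][k] is the minimum cost to cover condition-bitmask 'mask' with k distinct elements (k <= 3), a constant-size table updated in O(1) per element.
-- outside the precondition, e.g. on brute_solution(0, 1, 1, 1, []): A returns inf, B returns inf
import Mathlib
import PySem

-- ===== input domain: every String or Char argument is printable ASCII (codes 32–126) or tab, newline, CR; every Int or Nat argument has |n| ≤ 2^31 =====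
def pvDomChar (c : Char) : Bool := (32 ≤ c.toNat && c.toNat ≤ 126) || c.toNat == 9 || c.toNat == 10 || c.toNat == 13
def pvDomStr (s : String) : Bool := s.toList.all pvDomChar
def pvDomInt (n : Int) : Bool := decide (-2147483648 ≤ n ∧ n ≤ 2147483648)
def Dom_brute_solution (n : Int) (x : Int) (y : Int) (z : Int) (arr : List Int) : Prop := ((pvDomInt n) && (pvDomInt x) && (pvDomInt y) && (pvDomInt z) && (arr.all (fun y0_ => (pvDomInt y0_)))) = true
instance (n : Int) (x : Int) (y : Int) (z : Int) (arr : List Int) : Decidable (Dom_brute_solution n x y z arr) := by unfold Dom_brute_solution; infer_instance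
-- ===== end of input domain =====

-- B replaces A's enumeration of all size-1..3 index subsets × 7^k mask assignments by a
-- single O(n) left-to-right DP over a constant 8×4 table (objective: faster, measured).

-- ===== PORT A =====
-- min of two int-or-infinity values (none models Python's float('inf')); used by both ports
-- exactly where their Pythons call min on such values.
def minO (a b : Option Int) : Option Int :=
  match a, b with
  | none, b => b
  | some a, none => some a
  | some a, some b => some (min a b)

def cost_to_divisible (a d : Int) : Int :=
  -- exact for d ≠ 0 (Python's % raises ZeroDivisionError at d = 0; excluded by Pre_)
  let r := PySem.Int.mod a d
  if r = 0 then 0 else d - r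

-- total_cost < local_best, where local_best may be float('inf') (= none)
def portA_ltO (t : Int) : Option Int → Bool
  | none => true
  | some b => decide (t < b)

-- itertools.product(range(1, 8), repeat := k), in CPython's order (hand port, exact)
def maskProduct : Nat → List (List Int)
  | 0 => [[]]
  | k + 1 => (PySem.List.pyRange 1 8 1).flatMap (fun m => (maskProduct k).map (m :: ·))

def portA_lcm (x y z : Int) : List Int :=
  let divisors : List (Int × Int) := [(1, x), (2, y), (4, z)]
  (PySem.List.pyRange 1 8 1).foldl (fun lm mask =>
    let ds := divisors.foldl (fun ds p => if PySem.Int.band mask p.1 ≠ 0 then ds ++ [p.2] else ds) []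
    let l := ds.foldl (fun l d => PySem.Int.floordiv (l * d) ((Int.gcd l d : Nat) : Int)) 1
    PySem.List.pySetD lm mask l) (List.replicate 8 0)

def portA_costArray (x y z : Int) (arr : List Int) : List (List Int) :=
  let lcm_for_mask := portA_lcm x y z
  arr.foldl (fun ca a =>
    let row := (PySem.List.pyRange 1 8 1).foldl (fun row mask =>
      PySem.List.pySetD row mask (cost_to_divisible a (PySem.List.pyGetD lcm_for_mask mask 0)))
      (List.replicate 8 0)
    ca ++ [row]) []

def portA_local (ca : List (List Int)) (ss : Nat) (indices : List Int) : Option Int :=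
  (maskProduct ss).foldl (fun lb chosen_masks =>
    let union_mask := chosen_masks.foldl (fun u m => PySem.Int.bor u m) 0
    if union_mask = 7 then
      let total_cost := (indices.zip chosen_masks).foldl
        (fun tc p => tc + PySem.List.pyGetD (PySem.List.pyGetD ca p.1 []) p.2 0) 0
      if portA_ltO total_cost lb then some total_cost else lb
    else lb) none

def portA_best (n x y z : Int) (arr : List Int) : Option Int :=
  let cost_array := portA_costArray x y z arr
  ([1, 2, 3] : List Nat).foldl (fun best subset_size =>
    (PySem.List.combinations (PySem.List.pyRange 0 n 1) subset_size).foldl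
      (fun best indices => minO best (portA_local cost_array subset_size indices)) best) none

def brute_solution (n : Int) (x : Int) (y : Int) (z : Int) (arr : List Int) : Int :=
  -- `.getD 0` is only reached when best = none, i.e. Python returns float('inf'): outside Pre_
  (portA_best n x y z arr).getD 0

-- ===== PORT B =====
def bruteAlt_lcm (x y z mask : Int) : Int :=
  ([(1, x), (2, y), (4, z)] : List (Int × Int)).foldl
    (fun l p => if PySem.Int.band mask p.1 ≠ 0
                then PySem.Int.floordiv (l * p.2) ((Int.gcd l p.2 : Nat) : Int) else l) 1

def portB_lcms (x y z : Int) : List Int :=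
  (PySem.List.pyRange 0 8 1).map (bruteAlt_lcm x y z)

def bruteAlt_cost (lcms : List Int) (a m : Int) : Int :=
  -- exact for lcms[m] ≠ 0 (guaranteed by Pre_: x, y, z ≠ 0)
  let r := PySem.Int.mod a (PySem.List.pyGetD lcms m 0)
  if r = 0 then 0 else PySem.List.pyGetD lcms m 0 - r

-- min over a Python list of int-or-float('inf') values (none models inf)
def minOList (l : List (Option Int)) : Option Int := l.foldl minO none

def addO : Option Int → Int → Option Int
  | none, _ => none
  | some v, c => some (v + c)

def portB_dp0 : List (List (Option Int)) :=
  (PySem.List.pyRange 0 8 1).map (fun M =>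
    (PySem.List.pyRange 0 4 1).map (fun k => if M = 0 ∧ k = 0 then some (0 : Int) else none))

def portB_step (x y z : Int) (dp : List (List (Option Int))) (a : Int) : List (List (Option Int)) :=
  (PySem.List.pyRange 0 8 1).map (fun M =>
    (PySem.List.pyRange 0 4 1).map (fun k =>
      minOList (PySem.List.pyGetD (PySem.List.pyGetD dp M []) k none ::
        (PySem.List.pyRange 0 8 1).flatMap (fun m =>
          (PySem.List.pyRange 1 8 1).filterMap (fun mm =>
            if 1 ≤ k ∧ PySem.Int.bor m mm = M then
              some (addO (PySem.List.pyGetD (PySem.List.pyGetD dp m []) (k - 1) none)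
                         (bruteAlt_cost (portB_lcms x y z) a mm))
            else none)))))

def brute_solution_alt (n : Int) (x : Int) (y : Int) (z : Int) (arr : List Int) : Int :=
  -- arr[i]: pyGetD is exact here since Pre_ gives 0 ≤ i < n ≤ len(arr)
  let dp := (PySem.List.pyRange 0 n 1).foldl
      (fun dp i => portB_step x y z dp (PySem.List.pyGetD arr i 0)) portB_dp0
  -- `.getD 0` is only reached when the min is none, i.e. Python returns float('inf'): outside Pre_
  (minOList [PySem.List.pyGetD (PySem.List.pyGetD dp 7 []) 1 none,
             PySem.List.pyGetD (PySem.List.pyGetD dp 7 []) 2 none,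
             PySem.List.pyGetD (PySem.List.pyGetD dp 7 []) 3 none]).getD 0

-- ===== PRECONDITION & SPEC =====
-- Pre_ excludes: n ≤ 0, where A returns float('inf') (not an int); n > len(arr), where A
-- raises IndexError; and x = 0, y = 0 or z = 0, where A raises ZeroDivisionError.
def Pre_brute_solution (n : Int) (x : Int) (y : Int) (z : Int) (arr : List Int) : Prop :=
  1 ≤ n ∧ n ≤ (arr.length : Int) ∧ x ≠ 0 ∧ y ≠ 0 ∧ z ≠ 0
instance (n : Int) (x : Int) (y : Int) (z : Int) (arr : List Int) : Decidable (Pre_brute_solution n x y z arr) := by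
  unfold Pre_brute_solution; infer_instance

def pvWitness_brute_solution : Int × Int × Int × Int × List Int := (2, 2, 3, 5, [7, 11])

def Spec_brute_solution (n : Int) (x : Int) (y : Int) (z : Int) (arr : List Int) (out : Int) : Prop := out = brute_solution_alt n x y z arr
instance (n : Int) (x : Int) (y : Int) (z : Int) (arr : List Int) (out : Int) : Decidable (Spec_brute_solution n x y z arr out) := by unfold Spec_brute_solution; infer_instance

-- ===== CLAIM (what is proved, stated in full; the proofs are below) =====
def Claim_equal_brute_solution : Prop := ∀ (n : Int) (x : Int) (y : Int) (z : Int) (arr : List Int), Dom_brute_solution n x y z arr → Pre_brute_solution n x y z arr → Spec_brute_solution n x y z arr (brute_solution n x y z arr)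

-- ===== LEMMAS AND PROOFS =====

-- "o is the minimum (none = +∞) of the set of values satisfying P"
def IsMinP (P : Int → Prop) : Option Int → Prop
  | some v => P v ∧ ∀ w, P w → v ≤ w
  | none => ∀ v, ¬ P v

theorem isMinP_unique {P : Int → Prop} {o o' : Option Int}
    (h : IsMinP P o) (h' : IsMinP P o') : o = o' := by
  cases o with
  | none => cases o' with
    | none => rfl
    | some v' => exact absurd h'.1 (h v')
  | some v => cases o' with
    | none => exact absurd h.1 (h' v)
    | some v' => exact congrArg some (le_antisymm (h.2 v' h'.1) (h'.2 v h.1))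

theorem isMinP_congr {P Q : Int → Prop} {o : Option Int}
    (hpq : ∀ v, P v ↔ Q v) (h : IsMinP P o) : IsMinP Q o := by
  cases o with
  | none => exact fun v hv => h v ((hpq v).mpr hv)
  | some v => exact ⟨(hpq v).mp h.1, fun w hw => h.2 w ((hpq w).mpr hw)⟩

theorem isMinP_minO {P Q : Int → Prop} {a b : Option Int}
    (ha : IsMinP P a) (hb : IsMinP Q b) : IsMinP (fun v => P v ∨ Q v) (minO a b) := by
  cases a with
  | none =>
    cases b with
    | none => exact fun v hv => hv.elim (ha v) (hb v)
    | some vb =>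
      exact ⟨Or.inr hb.1, fun w hw => hw.elim (fun h => absurd h (ha w)) (fun h => hb.2 w h)⟩
  | some va =>
    cases b with
    | none =>
      exact ⟨Or.inl ha.1, fun w hw => hw.elim (fun h => ha.2 w h) (fun h => absurd h (hb w))⟩
    | some vb =>
      refine ⟨?_, fun w hw => ?_⟩
      · rcases le_total va vb with h | h
        · simpa [minO, min_eq_left h] using Or.inl ha.1
        · simpa [minO, min_eq_right h] using Or.inr hb.1
      · rcases hw with h | h
        · exact le_trans (min_le_left va vb) (ha.2 w h)
        · exact le_trans (min_le_right va vb) (hb.2 w h)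

theorem isMinP_dominates {P Q : Int → Prop} {o : Option Int}
    (h : IsMinP P o) (h1 : ∀ v, P v → Q v) (h2 : ∀ w, Q w → ∃ v, P v ∧ v ≤ w) :
    IsMinP Q o := by
  cases o with
  | none => exact fun w hw => (h2 w hw).elim (fun v hv => h v hv.1)
  | some v =>
    refine ⟨h1 v h.1, fun w hw => ?_⟩
    obtain ⟨v', hv', hle⟩ := h2 w hw
    exact le_trans (h.2 v' hv') hle

theorem minO_none_right (a : Option Int) : minO a none = a := by cases a <;> rfl

theorem minO_assoc (a b c : Option Int) : minO (minO a b) c = minO a (minO b c) := by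
  cases a <;> cases b <;> cases c <;> simp [minO, min_assoc]

theorem foldl_minO_g {α : Type} (g : α → Option Int) (l : List α) (acc : Option Int) :
    l.foldl (fun b x => minO b (g x)) acc = minO acc (l.foldl (fun b x => minO b (g x)) none) := by
  induction l generalizing acc with
  | nil => simp [List.foldl, minO_none_right]
  | cons x t ih =>
    simp only [List.foldl]
    rw [ih (minO acc (g x)), ih (minO none (g x)), minO_assoc]
    rfl

theorem minOList_cons (e : Option Int) (l : List (Option Int)) :
    minOList (e :: l) = minO e (minOList l) := by
  show List.foldl minO (minO none e) l = _
  have := foldl_minO_g (g := fun o => o) (l := l) (acc := minO none e)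
  simpa [minOList] using this

theorem isMinP_foldl {α : Type} (g : α → Option Int) (l : List α) :
    IsMinP (fun v => ∃ a, a ∈ l ∧ g a = some v)
      (l.foldl (fun b x => minO b (g x)) none) := by
  induction l with
  | nil => intro v ⟨a, ha, _⟩; simp at ha
  | cons x t ih =>
    have hx : IsMinP (fun v => g x = some v) (g x) := by
      cases hgx : g x with
      | none => intro v hv; simp at hv
      | some v => exact ⟨rfl, fun w hw => by simp_all⟩
    have := isMinP_minO hx ih
    rw [show (x :: t).foldl (fun b x => minO b (g x)) none
          = t.foldl (fun b x => minO b (g x)) (minO none (g x)) from rfl,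
        foldl_minO_g]
    refine isMinP_congr (fun v => ?_) (by simpa using this)
    constructor
    · rintro (h | ⟨a, ha, hg⟩)
      · exact ⟨x, by simp, h⟩
      · exact ⟨a, by simp [ha], hg⟩
    · rintro ⟨a, ha, hg⟩
      rcases List.mem_cons.mp ha with rfl | ha
      · exact Or.inl hg
      · exact Or.inr ⟨a, ha, hg⟩

theorem isMinP_minOList (l : List (Option Int)) :
    IsMinP (fun v => some v ∈ l) (minOList l) := by
  have := isMinP_foldl (g := fun o => o) (l := l)
  refine isMinP_congr (fun v => ?_) this
  constructor
  · rintro ⟨a, ha, rfl⟩; exact ha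
  · intro h; exact ⟨some v, h, rfl⟩

-- mask tuples
theorem mem_maskProduct (k : Nat) (ms : List Int) :
    ms ∈ maskProduct k ↔ ms.length = k ∧ ∀ mm ∈ ms, 1 ≤ mm ∧ mm < 8 := by
  induction k generalizing ms with
  | zero =>
    simp only [maskProduct, List.mem_singleton]
    constructor
    · rintro rfl; simp
    · rintro ⟨hl, _⟩; exact List.length_eq_zero_iff.mp hl
  | succ k ih =>
    simp only [maskProduct, List.mem_flatMap, List.mem_map]
    constructor
    · rintro ⟨m, hm, ms', hms', rfl⟩
      have hm' := (PySem.List.mem_pyRange_one).mp hm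
      obtain ⟨hl, hall⟩ := ih ms' |>.mp hms'
      refine ⟨by simp [hl], ?_⟩
      intro mm hmm
      rcases List.mem_cons.mp hmm with rfl | hmm
      · exact ⟨hm'.1, hm'.2⟩
      · exact hall mm hmm
    · rintro ⟨hl, hall⟩
      cases ms with
      | nil => simp at hl
      | cons m ms' =>
        have hm := hall m (by simp)
        refine ⟨m, (PySem.List.mem_pyRange_one).mpr ⟨hm.1, hm.2⟩, ms', ?_, rfl⟩
        exact (ih ms').mpr ⟨by simpa using hl, fun mm hmm => hall mm (by simp [hmm])⟩

-- the canonical per-element cost (B's cost function)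
def pvCost (x y z a m : Int) : Int := bruteAlt_cost (portB_lcms x y z) a m

def pvVal (x y z : Int) (E M : List Int) : Int :=
  ((E.zip M).map (fun p => pvCost x y z p.1 p.2)).sum

-- "v is the total cost of some selection from prefix p: k distinct elements, each with a
--  nonempty mask, whose union is m"
def pvSel (x y z : Int) (p : List Int) (m : Int) (k : Nat) (v : Int) : Prop :=
  ∃ E M : List Int, E.Sublist p ∧ E.length = k ∧ M.length = k ∧
    (∀ mm ∈ M, 1 ≤ mm ∧ mm < 8) ∧ M.foldl PySem.Int.bor 0 = m ∧ v = pvVal x y z E M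

theorem bor_lt_eight {a b : Int} (ha : 0 ≤ a ∧ a < 8) (hb : 0 ≤ b ∧ b < 8) :
    0 ≤ PySem.Int.bor a b ∧ PySem.Int.bor a b < 8 := by
  rw [PySem.Int.bor_of_nonneg ha.1 hb.1]
  have h1 : a.toNat < 8 := by omega
  have h2 : b.toNat < 8 := by omega
  have := Nat.or_lt_two_pow (n := 3) (by omega : a.toNat < 2 ^ 3) (by omega : b.toNat < 2 ^ 3)
  omega

theorem orfold_bounds {M : List Int} (h : ∀ mm ∈ M, 1 ≤ mm ∧ mm < 8) :
    0 ≤ M.foldl PySem.Int.bor 0 ∧ M.foldl PySem.Int.bor 0 < 8 := by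
  suffices H : ∀ acc, 0 ≤ acc ∧ acc < 8 → 0 ≤ M.foldl PySem.Int.bor acc ∧ M.foldl PySem.Int.bor acc < 8 by
    exact H 0 (by omega)
  induction M with
  | nil => intro acc hacc; simpa using hacc
  | cons mm M ih =>
    intro acc hacc
    have hmm := h mm (by simp)
    have := bor_lt_eight hacc ⟨by omega, hmm.2⟩
    exact ih (fun m hm => h m (by simp [hm])) _ this

-- ===== main A-side and B-side lemmas (stated, proofs below) =====

theorem lcmA_eq (x y z : Int) : portA_lcm x y z =
    [0, bruteAlt_lcm x y z 1, bruteAlt_lcm x y z 2, bruteAlt_lcm x y z 3,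
        bruteAlt_lcm x y z 4, bruteAlt_lcm x y z 5, bruteAlt_lcm x y z 6, bruteAlt_lcm x y z 7] := by
  have h18 : PySem.List.pyRange 1 8 1 = [1,2,3,4,5,6,7] := by decide
  simp only [portA_lcm, bruteAlt_lcm, h18, List.foldl, List.replicate]
  norm_num [PySem.List.pySetD_of_nonneg, PySem.Int.band,
    show Int.toNat 1 = 1 from rfl, show Int.toNat 2 = 2 from rfl, show Int.toNat 3 = 3 from rfl,
    show Int.toNat 4 = 4 from rfl, show Int.toNat 5 = 5 from rfl, show Int.toNat 6 = 6 from rfl,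
    show Int.toNat 7 = 7 from rfl, List.set]
  simp [List.foldl]

theorem lcmsB_eq (x y z : Int) : portB_lcms x y z =
    [bruteAlt_lcm x y z 0, bruteAlt_lcm x y z 1, bruteAlt_lcm x y z 2, bruteAlt_lcm x y z 3,
     bruteAlt_lcm x y z 4, bruteAlt_lcm x y z 5, bruteAlt_lcm x y z 6, bruteAlt_lcm x y z 7] := by
  have h08 : PySem.List.pyRange 0 8 1 = [0,1,2,3,4,5,6,7] := by decide
  simp [portB_lcms, h08]

theorem row_eq (x y z a m : Int) (hm1 : 1 ≤ m) (hm2 : m < 8) :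
    PySem.List.pyGetD ((PySem.List.pyRange 1 8 1).foldl (fun row mask =>
      PySem.List.pySetD row mask (cost_to_divisible a (PySem.List.pyGetD (portA_lcm x y z) mask 0)))
      (List.replicate 8 0)) m 0 = pvCost x y z a m := by
  have h18 : PySem.List.pyRange 1 8 1 = [1,2,3,4,5,6,7] := by decide
  rw [lcmA_eq]
  simp only [h18, List.foldl, List.replicate]
  norm_num [PySem.List.pySetD_of_nonneg, PySem.List.pyGetD_ofNat',
    show Int.toNat 1 = 1 from rfl, show Int.toNat 2 = 2 from rfl, show Int.toNat 3 = 3 from rfl,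
    show Int.toNat 4 = 4 from rfl, show Int.toNat 5 = 5 from rfl, show Int.toNat 6 = 6 from rfl,
    show Int.toNat 7 = 7 from rfl, List.set]
  interval_cases m <;>
    simp [pvCost, bruteAlt_cost, lcmsB_eq, cost_to_divisible, PySem.List.pyGetD_ofNat']

theorem costA_eq (x y z : Int) (arr : List Int) (i m : Int)
    (hi : 0 ≤ i) (hi2 : i < (arr.length : Int)) (hm1 : 1 ≤ m) (hm2 : m < 8) :
    PySem.List.pyGetD (PySem.List.pyGetD (portA_costArray x y z arr) i []) m 0
      = pvCost x y z (arr.getD i.toNat 0) m := by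
  have hi' : i.toNat < arr.length := by omega
  simp only [portA_costArray]
  rw [PySem.List.foldl_append_singleton_eq_map]
  rw [List.nil_append,
      PySem.List.pyGetD_eq_getElem _ _ hi (by simpa using hi2)]
  rw [List.getElem_map]
  rw [row_eq x y z _ m hm1 hm2, List.getD_eq_getElem arr 0 hi']

theorem take_eq_map_pyRange (n : Int) (arr : List Int) (_h1 : 0 ≤ n) (h2 : n ≤ (arr.length : Int)) :
    arr.take n.toNat = (PySem.List.pyRange 0 n 1).map (fun i => arr.getD i.toNat 0) := by
  rw [PySem.List.pyRange_one, List.map_map]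
  apply List.ext_getElem
  · simp; omega
  · intro i h1' h2'
    simp only [List.getElem_take, List.getElem_map, List.getElem_range, Function.comp]
    have hi : i < arr.length := by simp at h1'; omega
    rw [List.getD_eq_getElem?_getD]
    simp [List.getElem?_eq_getElem hi]

theorem pvVal_append (x y z : Int) (E M : List Int) (a mm : Int) (h : E.length = M.length) :
    pvVal x y z (E ++ [a]) (M ++ [mm]) = pvVal x y z E M + pvCost x y z a mm := by
  simp [pvVal, List.zip_append h]

theorem sel_append (x y z : Int) (p : List Int) (a : Int) (m : Int) (k : Nat) (v : Int) :
    pvSel x y z (p ++ [a]) m k v ↔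
      pvSel x y z p m k v ∨
      (∃ m' mm v', (0 ≤ m' ∧ m' < 8) ∧ (1 ≤ mm ∧ mm < 8) ∧ PySem.Int.bor m' mm = m ∧
        1 ≤ k ∧ pvSel x y z p m' (k - 1) v' ∧ v = v' + pvCost x y z a mm) := by
  constructor
  · rintro ⟨E, M, hsub, hlenE, hlenM, hmask, hor, rfl⟩
    rcases List.sublist_append_iff.mp hsub with ⟨E₁, E₂, heq, h1, h2⟩
    rcases List.sublist_singleton.mp h2 with rfl | rfl
    · rw [List.append_nil] at heq; subst heq
      exact Or.inl ⟨E, M, h1, hlenE, hlenM, hmask, hor, rfl⟩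
    · subst heq
      have hk : 1 ≤ k := by rw [← hlenE]; simp
      have hMne : M ≠ [] := by
        intro h; rw [h] at hlenM; simp at hlenM; omega
      rcases (List.eq_nil_or_concat M).resolve_left hMne with ⟨M₁, mm, rfl⟩
      rw [List.concat_eq_append] at *
      have hmm := hmask mm (by simp)
      have hM₁ : ∀ m'' ∈ M₁, 1 ≤ m'' ∧ m'' < 8 := fun m'' h => hmask m'' (by simp [h])
      have hlE : E₁.length = k - 1 := by simp at hlenE; omega
      have hlM : M₁.length = k - 1 := by simp at hlenM; omega
      refine Or.inr ⟨M₁.foldl PySem.Int.bor 0, mm, pvVal x y z E₁ M₁,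
        orfold_bounds hM₁, hmm, ?_, hk, ⟨E₁, M₁, h1, hlE, hlM, hM₁, rfl, rfl⟩, ?_⟩
      · rw [← hor]; simp [List.foldl_append]
      · rw [pvVal_append x y z E₁ M₁ a mm (by omega)]
  · rintro (⟨E, M, hsub, h2, h3, h4, h5, rfl⟩ |
            ⟨m', mm, v', hb1, hb2, hbor, hk, ⟨E, M, hsub, hE, hM, hmask, hor, rfl⟩, rfl⟩)
    · exact ⟨E, M, hsub.trans (List.sublist_append_left _ _), h2, h3, h4, h5, rfl⟩
    · refine ⟨E ++ [a], M ++ [mm], hsub.append (List.Sublist.refl [a]), ?_, ?_, ?_, ?_, ?_⟩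
      · simp [hE]; omega
      · simp [hM]; omega
      · intro mm' hmm'
        rcases List.mem_append.mp hmm' with h | h
        · exact hmask mm' h
        · simp at h; subst h; exact hb2
      · simp [List.foldl_append, hor, hbor]
      · rw [pvVal_append x y z E M a mm (by omega)]

-- A's inner total_cost for a choice of indices and masks
def tcA (x y z : Int) (arr : List Int) (I ms : List Int) : Int :=
  (I.zip ms).foldl
    (fun tc p => tc + PySem.List.pyGetD (PySem.List.pyGetD (portA_costArray x y z arr) p.1 []) p.2 0) 0

theorem updA_eq (tc : Int) (lb : Option Int) :
    (if portA_ltO tc lb then some tc else lb) = minO lb (some tc) := by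
  cases lb with
  | none => rfl
  | some b =>
    simp only [portA_ltO, minO, decide_eq_true_eq]
    split_ifs with h
    · rw [min_eq_right (le_of_lt h)]
    · rw [min_eq_left (by omega)]

theorem updA_eq' (c : Prop) [Decidable c] (tc : Int) (lb : Option Int) :
    (if c then (if portA_ltO tc lb then some tc else lb) else lb)
      = minO lb (if c then some tc else none) := by
  by_cases h : c
  · rw [if_pos h, if_pos h]; exact updA_eq tc lb
  · rw [if_neg h, if_neg h]; exact (minO_none_right lb).symm

theorem local_isMin (x y z : Int) (arr : List Int) (ss : Nat) (I : List Int) :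
    IsMinP (fun v => ∃ ms, ms ∈ maskProduct ss ∧
        ms.foldl (fun u m => PySem.Int.bor u m) 0 = 7 ∧ v = tcA x y z arr I ms)
      (portA_local (portA_costArray x y z arr) ss I) := by
  unfold portA_local
  have hrw : (maskProduct ss).foldl (fun lb chosen_masks =>
      let union_mask := chosen_masks.foldl (fun u m => PySem.Int.bor u m) 0
      if union_mask = 7 then
        let total_cost := (I.zip chosen_masks).foldl
          (fun tc p => tc + PySem.List.pyGetD (PySem.List.pyGetD (portA_costArray x y z arr) p.1 []) p.2 0) 0
        if portA_ltO total_cost lb then some total_cost else lb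
      else lb) none
      = (maskProduct ss).foldl (fun lb ms =>
          minO lb (if ms.foldl (fun u m => PySem.Int.bor u m) 0 = 7 then some (tcA x y z arr I ms) else none)) none := by
    apply PySem.List.foldl_congr_mem
    intro lb ms _
    exact updA_eq' _ _ lb
  rw [hrw]
  refine isMinP_congr (fun v => ?_) (isMinP_foldl _ _)
  constructor
  · rintro ⟨ms, hms, heq⟩
    by_cases h : ms.foldl (fun u m => PySem.Int.bor u m) 0 = 7
    · rw [if_pos h] at heq
      exact ⟨ms, hms, h, (Option.some_inj.mp heq).symm⟩
    · rw [if_neg h] at heq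
      simp at heq
  · rintro ⟨ms, hms, hor, rfl⟩
    exact ⟨ms, hms, by simp [hor]⟩

theorem tcA_eq (n x y z : Int) (arr : List Int) (I ms : List Int)
    (hn : n ≤ (arr.length : Int))
    (hI : I.Sublist (PySem.List.pyRange 0 n 1)) (hms : ∀ mm ∈ ms, 1 ≤ mm ∧ mm < 8) :
    tcA x y z arr I ms = pvVal x y z (I.map (fun i => arr.getD i.toNat 0)) ms := by
  unfold tcA pvVal
  rw [PySem.List.foldl_add, List.zip_map_left, List.map_map]
  rw [zero_add]
  apply congrArg List.sum
  apply List.map_congr_left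
  rintro ⟨i, mm⟩ hp
  obtain ⟨hpI, hpms⟩ := List.of_mem_zip hp
  have hi := PySem.List.mem_pyRange_one.mp (hI.subset hpI)
  have hm := hms mm hpms
  simpa [Prod.map] using
    costA_eq x y z arr i mm hi.1 (lt_of_lt_of_le hi.2 hn) hm.1 hm.2

theorem candA_iff (n x y z : Int) (arr : List Int) (hn1 : 0 ≤ n) (hn2 : n ≤ (arr.length : Int))
    (ss : Nat) (v : Int) :
    (∃ I, (I ∈ PySem.List.combinations (PySem.List.pyRange 0 n 1) ss) ∧
       ∃ ms, ms ∈ maskProduct ss ∧ ms.foldl (fun u m => PySem.Int.bor u m) 0 = 7 ∧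
         v = tcA x y z arr I ms)
    ↔ pvSel x y z (arr.take n.toNat) 7 ss v := by
  rw [take_eq_map_pyRange n arr hn1 hn2]
  constructor
  · rintro ⟨I, hIc, ms, hms, hor, rfl⟩
    obtain ⟨hI, hlen⟩ := (PySem.List.mem_combinations_iff _ _ _).mp hIc
    obtain ⟨hlms, hmsb⟩ := (mem_maskProduct ss ms).mp hms
    exact ⟨I.map (fun i => arr.getD i.toNat 0), ms, hI.map _, by simp [hlen], hlms, hmsb, hor,
      tcA_eq n x y z arr I ms hn2 hI hmsb⟩
  · rintro ⟨E, ms, hE, hlenE, hlms, hmsb, hor, rfl⟩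
    obtain ⟨I, hI, rfl⟩ := List.sublist_map_iff.mp hE
    refine ⟨I, (PySem.List.mem_combinations_iff _ _ _).mpr ⟨hI, by simpa using hlenE⟩,
      ms, (mem_maskProduct ss ms).mpr ⟨hlms, hmsb⟩, hor,
      (tcA_eq n x y z arr I ms hn2 hI hmsb).symm⟩

theorem F_isMin (n x y z : Int) (arr : List Int) (hn1 : 0 ≤ n) (hn2 : n ≤ (arr.length : Int)) (ss : Nat) :
    IsMinP (pvSel x y z (arr.take n.toNat) 7 ss)
      ((PySem.List.combinations (PySem.List.pyRange 0 n 1) ss).foldl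
        (fun b I => minO b (portA_local (portA_costArray x y z arr) ss I)) none) := by
  have hfold := isMinP_foldl (g := portA_local (portA_costArray x y z arr) ss)
    (l := PySem.List.combinations (PySem.List.pyRange 0 n 1) ss)
  refine isMinP_dominates hfold ?_ ?_
  · rintro v ⟨I, hIc, heq⟩
    have hloc := local_isMin x y z arr ss I
    rw [heq] at hloc
    obtain ⟨ms, hms, hor, rfl⟩ := hloc.1
    exact (candA_iff n x y z arr hn1 hn2 ss _).mp ⟨I, hIc, ms, hms, hor, rfl⟩
  · intro w hw
    obtain ⟨I, hIc, ms, hms, hor, rfl⟩ := (candA_iff n x y z arr hn1 hn2 ss _).mpr hw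
    have hloc := local_isMin x y z arr ss I
    cases hlv : portA_local (portA_costArray x y z arr) ss I with
    | none => rw [hlv] at hloc; exact absurd ⟨ms, hms, hor, rfl⟩ (hloc _)
    | some v₀ =>
      rw [hlv] at hloc
      exact ⟨v₀, ⟨I, hIc, hlv⟩, hloc.2 _ ⟨ms, hms, hor, rfl⟩⟩

theorem A_isMin (n x y z : Int) (arr : List Int)
    (hn1 : 1 ≤ n) (hn2 : n ≤ (arr.length : Int)) :
    IsMinP (fun v => pvSel x y z (arr.take n.toNat) 7 1 v ∨
                     pvSel x y z (arr.take n.toNat) 7 2 v ∨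
                     pvSel x y z (arr.take n.toNat) 7 3 v)
      (portA_best n x y z arr) := by
  have h0 : (0:Int) ≤ n := by omega
  have h1 := F_isMin n x y z arr h0 hn2 1
  have h2 := F_isMin n x y z arr h0 hn2 2
  have h3 := F_isMin n x y z arr h0 hn2 3
  unfold portA_best
  simp only [List.foldl]
  rw [foldl_minO_g (g := portA_local (portA_costArray x y z arr) 3),
      foldl_minO_g (g := portA_local (portA_costArray x y z arr) 2),
      foldl_minO_g (g := portA_local (portA_costArray x y z arr) 1)]
  have hfalse : IsMinP (fun _ => False) none := fun v h => h
  have hmin := isMinP_minO (isMinP_minO (isMinP_minO hfalse h1) h2) h3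
  exact isMinP_congr (fun v => by tauto) hmin

-- the DP invariant: every table entry is the minimum over selections from the processed prefix
def DPInv (x y z : Int) (p : List Int) (dp : List (List (Option Int))) : Prop :=
  ∀ (M k : Int), 0 ≤ M → M < 8 → 0 ≤ k → k < 4 →
    IsMinP (pvSel x y z p M k.toNat) (PySem.List.pyGetD (PySem.List.pyGetD dp M []) k none)

theorem dp0_lookup (M k : Int) (hM0 : 0 ≤ M) (hM8 : M < 8) (hk0 : 0 ≤ k) (hk4 : k < 4) :
    PySem.List.pyGetD (PySem.List.pyGetD portB_dp0 M []) k none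
      = if M = 0 ∧ k = 0 then some 0 else none := by
  unfold portB_dp0
  rw [PySem.List.pyGetD_map_pyRange_of_nonneg _ 8 M _ hM0 hM8,
      PySem.List.pyGetD_map_pyRange_of_nonneg _ 4 k _ hk0 hk4]

theorem inv0 (x y z : Int) : DPInv x y z [] portB_dp0 := by
  intro M k hM0 hM8 hk0 hk4
  rw [dp0_lookup M k hM0 hM8 hk0 hk4]
  by_cases h : M = 0 ∧ k = 0
  · rw [if_pos h]
    obtain ⟨rfl, rfl⟩ := h
    refine ⟨⟨[], [], List.Sublist.refl [], rfl, rfl, by simp, rfl, rfl⟩, ?_⟩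
    rintro w ⟨E, Mm, hsub, hE, hM, _, _, rfl⟩
    obtain rfl := List.sublist_nil.mp hsub
    obtain rfl : Mm = [] := List.length_eq_zero_iff.mp (by simpa using hM)
    simp [pvVal]
  · rw [if_neg h]
    rintro v ⟨E, Mm, hsub, hE, hM, hmask, hor, rfl⟩
    obtain rfl := List.sublist_nil.mp hsub
    have hk' : k.toNat = 0 := by simpa using hE.symm
    obtain rfl : Mm = [] := List.length_eq_zero_iff.mp (by omega)
    exact h ⟨by simpa using hor.symm, by omega⟩

theorem step_lookup (x y z : Int) (dp : List (List (Option Int))) (a : Int) (M k : Int)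
    (hM0 : 0 ≤ M) (hM8 : M < 8) (hk0 : 0 ≤ k) (hk4 : k < 4) :
    PySem.List.pyGetD (PySem.List.pyGetD (portB_step x y z dp a) M []) k none
      = minOList (PySem.List.pyGetD (PySem.List.pyGetD dp M []) k none ::
          (PySem.List.pyRange 0 8 1).flatMap (fun m =>
            (PySem.List.pyRange 1 8 1).filterMap (fun mm =>
              if 1 ≤ k ∧ PySem.Int.bor m mm = M then
                some (addO (PySem.List.pyGetD (PySem.List.pyGetD dp m []) (k - 1) none)
                           (bruteAlt_cost (portB_lcms x y z) a mm))
              else none))) := by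
  unfold portB_step
  rw [PySem.List.pyGetD_map_pyRange_of_nonneg _ 8 M _ hM0 hM8,
      PySem.List.pyGetD_map_pyRange_of_nonneg _ 4 k _ hk0 hk4]

theorem inv_step (x y z : Int) (p : List Int) (dp : List (List (Option Int))) (a : Int)
    (h : DPInv x y z p dp) : DPInv x y z (p ++ [a]) (portB_step x y z dp a) := by
  intro M k hM0 hM8 hk0 hk4
  rw [step_lookup x y z dp a M k hM0 hM8 hk0 hk4, minOList_cons]
  have hold := h M k hM0 hM8 hk0 hk4
  have hlist : IsMinP (fun v => ∃ m' mm v', (0 ≤ m' ∧ m' < 8) ∧ (1 ≤ mm ∧ mm < 8) ∧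
      PySem.Int.bor m' mm = M ∧ 1 ≤ k.toNat ∧ pvSel x y z p m' (k.toNat - 1) v' ∧
      v = v' + pvCost x y z a mm)
      (minOList ((PySem.List.pyRange 0 8 1).flatMap (fun m =>
        (PySem.List.pyRange 1 8 1).filterMap (fun mm =>
          if 1 ≤ k ∧ PySem.Int.bor m mm = M then
            some (addO (PySem.List.pyGetD (PySem.List.pyGetD dp m []) (k - 1) none)
                       (bruteAlt_cost (portB_lcms x y z) a mm))
          else none)))) := by
    refine isMinP_dominates (isMinP_minOList _) ?_ ?_
    · intro v hv
      simp only [List.mem_flatMap, List.mem_filterMap] at hv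
      obtain ⟨m, hm, mm, hmm, heq⟩ := hv
      by_cases hc : 1 ≤ k ∧ PySem.Int.bor m mm = M
      · rw [if_pos hc] at heq
        have hm' := PySem.List.mem_pyRange_one.mp hm
        have hmm' := PySem.List.mem_pyRange_one.mp hmm
        cases he : PySem.List.pyGetD (PySem.List.pyGetD dp m []) (k - 1) none with
        | none => rw [he] at heq; simp [addO] at heq
        | some v' =>
          rw [he] at heq
          have hv' : v = v' + pvCost x y z a mm := by
            have : addO (some v') (bruteAlt_cost (portB_lcms x y z) a mm) = some v :=
              Option.some_inj.mp heq
            simpa [addO, pvCost] using this.symm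
          have hinv := h m (k - 1) hm'.1 hm'.2 (by omega) (by omega)
          rw [he] at hinv
          rw [show (k - 1).toNat = k.toNat - 1 from by omega] at hinv
          exact ⟨m, mm, v', ⟨hm'.1, hm'.2⟩, hmm', hc.2, by omega, hinv.1, hv'⟩
      · rw [if_neg hc] at heq
        simp at heq
    · rintro w ⟨m', mm, v', hb1, hb2, hbor, hk1, hsel, rfl⟩
      have hk1' : (1:Int) ≤ k := by omega
      have hinv := h m' (k - 1) hb1.1 hb1.2 (by omega) (by omega)
      rw [show (k - 1).toNat = k.toNat - 1 from by omega] at hinv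
      cases he : PySem.List.pyGetD (PySem.List.pyGetD dp m' []) (k - 1) none with
      | none => rw [he] at hinv; exact absurd hsel (hinv _)
      | some v₀ =>
        rw [he] at hinv
        refine ⟨v₀ + pvCost x y z a mm, ?_, by have := hinv.2 _ hsel; omega⟩
        simp only [List.mem_flatMap, List.mem_filterMap]
        refine ⟨m', PySem.List.mem_pyRange_one.mpr ⟨hb1.1, hb1.2⟩,
                mm, PySem.List.mem_pyRange_one.mpr ⟨hb2.1, hb2.2⟩, ?_⟩
        rw [if_pos ⟨hk1', hbor⟩, he]
        rfl
  have hcomb := isMinP_minO hold hlist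
  exact isMinP_congr (fun v => (sel_append x y z p a M k.toNat v).symm) hcomb

theorem inv_fold (x y z : Int) (l : List Int) : ∀ (p : List Int) (dp : List (List (Option Int))),
    DPInv x y z p dp → DPInv x y z (p ++ l) (l.foldl (portB_step x y z) dp) := by
  induction l with
  | nil => intro p dp h; simpa using h
  | cons a t ih =>
    intro p dp h
    have h1 := inv_step x y z p dp a h
    have h2 := ih (p ++ [a]) _ h1
    simpa using h2

theorem B_isMin (n x y z : Int) (arr : List Int) (hn1 : 0 ≤ n) (hn2 : n ≤ (arr.length : Int)) :
    IsMinP (fun v => pvSel x y z (arr.take n.toNat) 7 1 v ∨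
                     pvSel x y z (arr.take n.toNat) 7 2 v ∨
                     pvSel x y z (arr.take n.toNat) 7 3 v)
      (minOList
        [PySem.List.pyGetD (PySem.List.pyGetD ((PySem.List.pyRange 0 n 1).foldl (fun dp i => portB_step x y z dp (PySem.List.pyGetD arr i 0)) portB_dp0) 7 []) 1 none,
         PySem.List.pyGetD (PySem.List.pyGetD ((PySem.List.pyRange 0 n 1).foldl (fun dp i => portB_step x y z dp (PySem.List.pyGetD arr i 0)) portB_dp0) 7 []) 2 none,
         PySem.List.pyGetD (PySem.List.pyGetD ((PySem.List.pyRange 0 n 1).foldl (fun dp i => portB_step x y z dp (PySem.List.pyGetD arr i 0)) portB_dp0) 7 []) 3 none]) := by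
  have hfold : (PySem.List.pyRange 0 n 1).foldl
      (fun dp i => portB_step x y z dp (PySem.List.pyGetD arr i 0)) portB_dp0
      = (arr.take n.toNat).foldl (portB_step x y z) portB_dp0 := by
    have hcongr : (PySem.List.pyRange 0 n 1).foldl
        (fun dp i => portB_step x y z dp (PySem.List.pyGetD arr i 0)) portB_dp0
        = (PySem.List.pyRange 0 n 1).foldl
            (fun dp i => portB_step x y z dp (arr.getD i.toNat 0)) portB_dp0 := by
      apply PySem.List.foldl_congr_mem
      intro acc i hi
      have h := PySem.List.mem_pyRange_one.mp hi
      have hlen : i < (arr.length : Int) := by omega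
      rw [PySem.List.pyGetD_eq_getElem _ _ h.1 hlen, List.getD_eq_getElem arr 0 (by omega)]
    rw [hcongr, take_eq_map_pyRange n arr hn1 hn2, List.foldl_map]
  rw [hfold]
  have hinv := inv_fold x y z (arr.take n.toNat) [] portB_dp0 (inv0 x y z)
  rw [List.nil_append] at hinv
  have e1 := hinv 7 1 (by norm_num) (by norm_num) (by norm_num) (by norm_num)
  have e2 := hinv 7 2 (by norm_num) (by norm_num) (by norm_num) (by norm_num)
  have e3 := hinv 7 3 (by norm_num) (by norm_num) (by norm_num) (by norm_num)
  rw [show ((1:Int)).toNat = 1 from rfl] at e1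
  rw [show ((2:Int)).toNat = 2 from rfl] at e2
  rw [show ((3:Int)).toNat = 3 from rfl] at e3
  rw [minOList_cons, minOList_cons, minOList_cons]
  rw [show minOList ([] : List (Option Int)) = none from rfl, minO_none_right]
  exact isMinP_minO e1 (isMinP_minO e2 e3)

-- ===== VERDICT (by name: the statement is the Claim_ definition above) =====
theorem brute_solution_spec : Claim_equal_brute_solution := by
  intro n x y z arr _hdom hpre
  obtain ⟨hn1, hn2, hx, hy, hz⟩ := hpre
  have hA := A_isMin n x y z arr hn1 hn2
  have hB := B_isMin n x y z arr (by omega) hn2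
  have := isMinP_unique hA hB
  show _ = brute_solution_alt n x y z arr
  unfold brute_solution brute_solution_alt
  rw [this]
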